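-- pv_equiv track=rewrite | github.com/ghee589/G1-s-lab | mpileup/merged_mpileup_merged_vafout.py | snvs_detail
-- ===== SOURCE A (Python) =====
-- def list_offspring(x):            #for splitting by F
--   a=x
--   b=a.split('F')
--   c=[]
--   for i in range(len(b)):
--     if b[i]!='' and b[i]!=':':
--       c.append(b[i])
--   return c
--
-- def snvs_detail(x):        # show detailed distribution of snvs through offsprings -> similar to indel_detail
--   a = list_offspring(x)
--   S=['A','T','G','C']
--   list1=[]
--   for j in a:
--     for i in range(len(S)):
--       if S[i] not in list1 and S[i] in j:
--         list1.append(S[i])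
--   list2=[]
--   for q in list1:
--     count=0
--     for k in a:
--       if q in k:
--         count+=1
--     list2.append([q,str(count)+"offspring"])
--
--   return list2
-- ===== SOURCE B (Python) =====
-- def snvs_detail(x):        # one accumulating pass: dict keyed by base, insertion order = first appearance
--     counts = {}
--     for j in x.split('F'):
--         if j == '' or j == ':':
--             continue
--         for base in ('A', 'T', 'G', 'C'):
--             if base in j:
--                 counts[base] = counts.get(base, 0) + 1
--     return [[b, str(c) + "offspring"] for b, c in counts.items()]
-- ===== Notes on version B (the rewrite author's own statement) =====
-- stated objective: simpler
-- what changed: A does a discovery pass to collect the distinct bases and then, for each collected base, re-scans the whole offspring list to count it; B makes one accumulating pass over the offspring, incrementing an insertion-ordered dict of per-base counts, and emits its items.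
import Mathlib
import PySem

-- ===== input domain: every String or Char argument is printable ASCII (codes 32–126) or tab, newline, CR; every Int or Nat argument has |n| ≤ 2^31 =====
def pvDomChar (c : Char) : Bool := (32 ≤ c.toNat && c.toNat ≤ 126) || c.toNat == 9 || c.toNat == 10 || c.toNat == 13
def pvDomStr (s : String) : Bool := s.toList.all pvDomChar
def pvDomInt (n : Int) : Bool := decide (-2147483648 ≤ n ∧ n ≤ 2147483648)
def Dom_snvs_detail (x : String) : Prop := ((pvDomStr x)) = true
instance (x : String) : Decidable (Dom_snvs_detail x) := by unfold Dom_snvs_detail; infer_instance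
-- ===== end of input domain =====

-- B replaces A's discovery pass plus per-base re-counting pass by ONE accumulating pass over the
-- offspring list with an insertion-ordered dict of counts (objective: simpler).

-- ===== PORT A =====
-- x.split('F'): the separator "F" is nonempty, so PySem.Str.split? is always `some`; `.getD []` is exact.
def list_offspring (x : String) : List String :=
  let a := x
  let b := (PySem.Str.split? a "F").getD []
  let c : List String := (PySem.List.pyRange 0 b.length).foldl
    (fun c i =>
      if PySem.List.pyGetD b i "" ≠ "" ∧ PySem.List.pyGetD b i "" ≠ ":" then
        c ++ [PySem.List.pyGetD b i ""]
      else c) []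
  c

def snvs_detail (x : String) : List (List String) :=
  let a := list_offspring x
  let S : List String := ["A", "T", "G", "C"]
  let list1 : List String := a.foldl (fun list1 j =>
    (PySem.List.pyRange 0 S.length).foldl (fun list1 i =>
      if PySem.List.pyGetD S i "" ∉ list1 ∧ PySem.Str.isIn (PySem.List.pyGetD S i "") j then
        list1 ++ [PySem.List.pyGetD S i ""]
      else list1) list1) []
  let list2 : List (List String) := list1.foldl (fun list2 q =>
    let count : Int := a.foldl (fun count k => if PySem.Str.isIn q k then count + 1 else count) 0
    list2 ++ [[q, PySem.Int.toStr count ++ "offspring"]]) []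
  list2

-- ===== PORT B =====
def snvs_detail_alt (x : String) : List (List String) :=
  let counts : PySem.Dict String Int :=
    ((PySem.Str.split? x "F").getD []).foldl (fun counts j =>
      if j = "" ∨ j = ":" then counts
      else ["A", "T", "G", "C"].foldl (fun counts base =>
        if PySem.Str.isIn base j then counts.insert base (counts.getD base 0 + 1) else counts)
        counts)
      PySem.Dict.empty
  counts.items.map (fun p => [p.1, PySem.Int.toStr p.2 ++ "offspring"])

-- ===== PRECONDITION & SPEC =====
def Spec_snvs_detail (x : String) (out : List (List String)) : Prop := out = snvs_detail_alt x
instance (x : String) (out : List (List String)) : Decidable (Spec_snvs_detail x out) := by unfold Spec_snvs_detail; infer_instance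

-- ===== CLAIM (what is proved, stated in full; the proofs are below) =====
def Claim_equal_snvs_detail : Prop := ∀ (x : String), Dom_snvs_detail x → Spec_snvs_detail x (snvs_detail x)

-- ===== LEMMAS AND PROOFS =====

-- the filtered offspring list both programs effectively traverse
def pvOffs (x : String) : List String :=
  ((PySem.Str.split? x "F").getD []).filter (fun p => decide (p ≠ "" ∧ p ≠ ":"))

-- the bases of one offspring, in 'ATGC' order
def pvBases (j : String) : List String :=
  ["A", "T", "G", "C"].filter (fun b => PySem.Str.isIn b j)

-- all base occurrences, offspring by offspring
def pvAll (x : String) : List String := (pvOffs x).flatMap pvBases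

-- A's first loop (list_offspring) builds exactly the filtered split
theorem list_offspring_eq (x : String) : list_offspring x = pvOffs x := by
  have h := PySem.List.foldl_pyRange_pyGetD ((PySem.Str.split? x "F").getD []) ""
      (fun c v => if v ≠ "" ∧ v ≠ ":" then c ++ [v] else c) ([] : List String) (a := 0) le_rfl
  simp only [PySem.List.len] at h
  unfold list_offspring pvOffs
  dsimp only
  rw [h, PySem.List.foldl_append_ite_eq_filter]
  simp

-- A's inner discovery loop over indices of S is the loop over S itself
theorem innerA_range (j : String) (l1 : List String) :
    (PySem.List.pyRange 0 ((["A","T","G","C"] : List String).length : Int)).foldl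
      (fun l1 i =>
        if PySem.List.pyGetD ["A","T","G","C"] i "" ∉ l1
            ∧ PySem.Str.isIn (PySem.List.pyGetD ["A","T","G","C"] i "") j then
          l1 ++ [PySem.List.pyGetD ["A","T","G","C"] i ""]
        else l1) l1
    = (["A","T","G","C"] : List String).foldl
        (fun l1 b => if b ∉ l1 ∧ PySem.Str.isIn b j then l1 ++ [b] else l1) l1 := by
  have h := PySem.List.foldl_pyRange_pyGetD (["A","T","G","C"] : List String) ""
      (fun l1 b => if b ∉ l1 ∧ PySem.Str.isIn b j then l1 ++ [b] else l1) l1 (a := 0) le_rfl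
  simp only [PySem.List.len] at h
  simpa using h

-- the conditional-append discovery loop is a Set.add fold over the bases present in j
theorem innerA_add (j : String) (T : List String) (l1 : List String) :
    T.foldl (fun l1 b => if b ∉ l1 ∧ PySem.Str.isIn b j then l1 ++ [b] else l1) l1
    = (T.filter (fun b => PySem.Str.isIn b j)).foldl PySem.Set.add l1 := by
  induction T generalizing l1 with
  | nil => rfl
  | cons b T ih =>
    by_cases hb : PySem.Str.isIn b j
    · simp only [List.foldl_cons, List.filter_cons, hb, if_pos]
      rw [ih]
      congr 1
      by_cases hm : b ∈ l1
      · simp [PySem.Set.add, hm]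
      · simp [PySem.Set.add, hm]
    · simp only [List.foldl_cons, List.filter_cons, hb]
      rw [if_neg (by simp), ih]
      simp

-- A's list1 is the ordered set of all bases seen
theorem list1_eq (x : String) :
    (pvOffs x).foldl (fun l1 j =>
      (["A","T","G","C"] : List String).foldl
        (fun l1 b => if b ∉ l1 ∧ PySem.Str.isIn b j then l1 ++ [b] else l1) l1) []
    = PySem.Set.ofList (pvAll x) := by
  rw [PySem.Set.ofList_eq_foldl, pvAll, List.foldl_flatMap]
  exact PySem.List.foldl_congr_mem _ _ _ _ (fun l1 j _ => innerA_add j _ l1)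

-- B's dict fold is Counter of the same base-occurrence list
theorem counts_eq (x : String) :
    ((PySem.Str.split? x "F").getD []).foldl (fun counts j =>
      if j = "" ∨ j = ":" then counts
      else (["A","T","G","C"] : List String).foldl (fun counts base =>
        if PySem.Str.isIn base j then counts.insert base (counts.getD base 0 + 1) else counts)
        counts)
      PySem.Dict.empty
    = PySem.Dict.counter (pvAll x) := by
  rw [pvAll, ← PySem.Dict.foldl_insert_getD_add_one_eq_counter, List.foldl_flatMap]
  rw [pvOffs, List.foldl_filter]
  apply PySem.List.foldl_congr_mem
  intro d j _
  by_cases hj : j = "" ∨ j = ":"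
  · have h2 : ¬ (j ≠ "" ∧ j ≠ ":") := by tauto
    rw [if_pos hj, if_neg (by simpa using h2)]
  · have h2 : j ≠ "" ∧ j ≠ ":" := by tauto
    rw [if_neg hj, if_pos (by simpa using h2), pvBases, List.foldl_filter]

-- a base that occurs occurs as often as there are offspring containing it
theorem count_all (x : String) (q : String) (hq : q ∈ pvAll x) :
    (pvAll x).count q = (pvOffs x).countP (fun k => PySem.Str.isIn q k) := by
  have hqS : q ∈ (["A","T","G","C"] : List String) := by
    rcases List.mem_flatMap.mp hq with ⟨j, _, hj⟩
    exact (List.mem_filter.mp hj).1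
  rw [pvAll]
  generalize pvOffs x = a
  induction a with
  | nil => rfl
  | cons j a ih =>
    rw [List.flatMap_cons, List.count_append, List.countP_cons, ih]
    have hbase : (pvBases j).count q = if PySem.Str.isIn q j then 1 else 0 := by
      by_cases h : PySem.Str.isIn q j
      · rw [if_pos h, pvBases, List.count_filter (p := fun b => PySem.Str.isIn b j) (a := q) h]
        fin_cases hqS <;> decide
      · rw [if_neg h, List.count_eq_zero]
        intro hmem
        exact h ((List.mem_filter.mp hmem).2)
    rw [hbase]
    by_cases h : PySem.Str.isIn q j <;> simp [Nat.add_comm]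

theorem snvs_eq (x : String) : snvs_detail x = snvs_detail_alt x := by
  simp only [snvs_detail, snvs_detail_alt, list_offspring_eq]
  rw [counts_eq, PySem.Dict.items_counter]
  have h1 : ∀ j l1,
      (PySem.List.pyRange 0 ((["A","T","G","C"] : List String).length : Int)).foldl
        (fun l1 i =>
          if PySem.List.pyGetD ["A","T","G","C"] i "" ∉ l1
              ∧ PySem.Str.isIn (PySem.List.pyGetD ["A","T","G","C"] i "") j then
            l1 ++ [PySem.List.pyGetD ["A","T","G","C"] i ""]
          else l1) l1
      = (["A","T","G","C"] : List String).foldl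
          (fun l1 b => if b ∉ l1 ∧ PySem.Str.isIn b j then l1 ++ [b] else l1) l1 :=
    innerA_range
  rw [PySem.List.foldl_congr_mem _ _ _ _ (fun l1 j _ => h1 j l1), list1_eq]
  rw [PySem.List.foldl_append_singleton_eq_map
        (f := fun q => [q, PySem.Int.toStr
          ((pvOffs x).foldl (fun count k => if PySem.Str.isIn q k then count + 1 else count) 0)
          ++ "offspring"])]
  simp only [List.nil_append, List.map_map]
  apply List.map_congr_left
  intro q hq
  have hq' : q ∈ pvAll x := (PySem.Set.mem_ofList _ q).mp hq
  simp only [Function.comp]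
  rw [PySem.List.foldl_if_add_one (fun k => PySem.Str.isIn q k), count_all x q hq']
  norm_num

-- ===== VERDICT (by name: the statement is the Claim_ definition above) =====
theorem snvs_detail_spec : Claim_equal_snvs_detail := by
  intro x _
  unfold Spec_snvs_detail
  exact snvs_eq x
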